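-- pv_equiv track=rewrite | github.com/coredreamstudios/finalcombatre | lua_unpacker.py | analyze_instruction_fields
-- ===== SOURCE A (Python) =====
-- from collections import Counter, defaultdict
--
-- def analyze_instruction_fields(data, block_size=4):
--     """Analyze patterns in Lua instruction fields"""
--     field_patterns = defaultdict(lambda: defaultdict(Counter))
--     sequence_patterns = defaultdict(Counter)
--
--     # Skip header
--     for i in range(12, len(data) - block_size, block_size):
--         block = data[i:i+block_size]
--
--         # Extract instruction fields
--         opcode = block[0] & 0x3F  # 6 bits
--         a = (block[0] >> 6) | ((block[1] & 0x1) << 2)  # 8 bits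
--         b = block[2]  # 9 bits
--         c = block[3]  # 9 bits
--
--         # Track field patterns for each opcode
--         field_patterns[opcode]['a'].update([a])
--         field_patterns[opcode]['b'].update([b])
--         field_patterns[opcode]['c'].update([c])
--
--         # Look for field relationships
--         if i > 12:
--             prev_block = data[i-block_size:i]
--             prev_opcode = prev_block[0] & 0x3F
--             prev_a = (prev_block[0] >> 6) | ((prev_block[1] & 0x1) << 2)
--             prev_b = prev_block[2]
--             prev_c = prev_block[3]
--
--             # Track field transitions
--             sequence_patterns['a'].update([(prev_a, a)])
--             sequence_patterns['b'].update([(prev_b, b)])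
--             sequence_patterns['c'].update([(prev_c, c)])
--
--     return field_patterns, sequence_patterns
-- ===== SOURCE B (Python) =====
-- from collections import Counter, defaultdict
--
-- def analyze_instruction_fields(data, block_size=4):
--     """Analyze patterns in Lua instruction fields (parse once, then tabulate)"""
--     field_patterns = defaultdict(lambda: defaultdict(Counter))
--     sequence_patterns = defaultdict(Counter)
--
--     # Pass 1: decode every instruction block once
--     parsed = []
--     for i in range(12, len(data) - block_size, block_size):
--         block = data[i:i+block_size]
--         parsed.append((block[0] & 0x3F,
--                        (block[0] >> 6) | ((block[1] & 0x1) << 2),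
--                        block[2],
--                        block[3]))
--
--     # Pass 2: per-opcode field histograms
--     for op, a, b, c in parsed:
--         fields = field_patterns[op]
--         fields['a'][a] += 1
--         fields['b'][b] += 1
--         fields['c'][c] += 1
--
--     # Pass 3: transitions between consecutive instructions
--     for (_, pa, pb, pc), (_, a, b, c) in zip(parsed, parsed[1:]):
--         sequence_patterns['a'][(pa, a)] += 1
--         sequence_patterns['b'][(pb, b)] += 1
--         sequence_patterns['c'][(pc, c)] += 1
--
--     return field_patterns, sequence_patterns
-- ===== Notes on version B (the rewrite author's own statement) =====
-- stated objective: alternative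
-- what changed: B decodes every instruction block exactly once into a parsed list and then fills the field histograms and the transition counters in two separate passes (pairing consecutive instructions with zip), instead of A's single loop that re-slices and re-decodes the previous block on every iteration.
import Mathlib
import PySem

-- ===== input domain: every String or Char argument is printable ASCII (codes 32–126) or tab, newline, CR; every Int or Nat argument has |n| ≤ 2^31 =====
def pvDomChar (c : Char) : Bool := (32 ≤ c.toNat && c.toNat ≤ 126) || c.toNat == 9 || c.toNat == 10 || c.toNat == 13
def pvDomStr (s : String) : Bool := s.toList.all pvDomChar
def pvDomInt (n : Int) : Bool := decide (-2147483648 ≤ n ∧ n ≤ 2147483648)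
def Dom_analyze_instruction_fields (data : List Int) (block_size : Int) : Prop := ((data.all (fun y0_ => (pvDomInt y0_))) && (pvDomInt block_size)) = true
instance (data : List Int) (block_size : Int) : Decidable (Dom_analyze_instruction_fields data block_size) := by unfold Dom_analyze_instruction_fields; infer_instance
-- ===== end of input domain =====

-- B decodes each block once into a `parsed` list and then tabulates histograms and transitions in
-- two separate passes (zip with the shifted list), instead of A's single loop that re-decodes the
-- previous block on every iteration; objective: alternative decomposition (no speed claim).

-- ===== PORT A =====
-- shared field extraction: block[0] & 0x3F, (block[0] >> 6) | ((block[1] & 0x1) << 2), block[2], block[3]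
def pvGet (xs : List Int) (k : Int) : Int := (PySem.List.pyGet? xs k).getD 0  -- Pre_ keeps every access in range
def pvFields (block : List Int) : Int × Int × Int × Int :=
  (PySem.Int.band (pvGet block 0) 0x3F,
   PySem.Int.bor ((pvGet block 0) >>> (6 : Nat)) ((PySem.Int.band (pvGet block 1) 0x1) <<< (2 : Nat)),
   pvGet block 2,
   pvGet block 3)

def pvFP : Type := PySem.Dict Int (PySem.Dict String (PySem.Dict Int Int))
def pvSP : Type := PySem.Dict String (PySem.Dict (Int × Int) Int)

-- field_patterns[opcode][f].update([x])  (one auto-vivifying outer access per Python statement)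
def pvFieldUpd (fp : pvFP) (op : Int) (f : String) (x : Int) : pvFP :=
  PySem.Dict.modify fp op PySem.Dict.empty
    (fun inner => PySem.Dict.modify inner f PySem.Dict.empty
      (fun c => PySem.Dict.modify c x 0 (· + 1)))

-- sequence_patterns[f].update([t])
def pvSeqUpd (sp : pvSP) (f : String) (t : Int × Int) : pvSP :=
  PySem.Dict.modify sp f PySem.Dict.empty (fun c => PySem.Dict.modify c t 0 (· + 1))

def pvRenderFP (fp : pvFP) : List (Int × List (String × List (Int × Int))) :=
  fp.items.map (fun kv => (kv.1, kv.2.items.map (fun sv => (sv.1, sv.2.items))))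
def pvRenderSP (sp : pvSP) : List (String × List (Int × Int × Int)) :=
  sp.items.map (fun sv => (sv.1, sv.2.items.map (fun pn => (pn.1.1, pn.1.2, pn.2))))

-- one iteration of A's loop body at index i
def pvStepA (data : List Int) (bs : Int) (st : pvFP × pvSP) (i : Int) : pvFP × pvSP :=
  let block := PySem.List.slice data (some i) (some (i + bs))
  let t := pvFields block
  let fp := pvFieldUpd (pvFieldUpd (pvFieldUpd st.1 t.1 "a" t.2.1) t.1 "b" t.2.2.1) t.1 "c" t.2.2.2
  let sp := if 12 < i then
      let prev_block := PySem.List.slice data (some (i - bs)) (some i)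
      let p := pvFields prev_block
      pvSeqUpd (pvSeqUpd (pvSeqUpd st.2 "a" (p.2.1, t.2.1)) "b" (p.2.2.1, t.2.2.1)) "c" (p.2.2.2, t.2.2.2)
    else st.2
  (fp, sp)

def analyze_instruction_fields (data : List Int) (block_size : Int) : (List (Int × List (String × List (Int × Int)))) × (List (String × List (Int × Int × Int))) :=
  let st := (PySem.List.pyRange 12 ((data.length : Int) - block_size) block_size).foldl
      (pvStepA data block_size) (PySem.Dict.empty, PySem.Dict.empty)
  (pvRenderFP st.1, pvRenderSP st.2)

-- ===== PORT B =====
-- fields = field_patterns[op]; fields['a'][a] += 1; fields['b'][b] += 1; fields['c'][c] += 1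
def pvRecord (fp : pvFP) (t : Int × Int × Int × Int) : pvFP :=
  PySem.Dict.modify fp t.1 PySem.Dict.empty (fun fields =>
    PySem.Dict.modify
      (PySem.Dict.modify
        (PySem.Dict.modify fields "a" PySem.Dict.empty (fun c => PySem.Dict.modify c t.2.1 0 (· + 1)))
        "b" PySem.Dict.empty (fun c => PySem.Dict.modify c t.2.2.1 0 (· + 1)))
      "c" PySem.Dict.empty (fun c => PySem.Dict.modify c t.2.2.2 0 (· + 1)))

-- sequence_patterns[f][(prev_field, cur_field)] += 1 for f in a, b, c
def pvTrans (sp : pvSP) (pr cu : Int × Int × Int × Int) : pvSP :=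
  pvSeqUpd (pvSeqUpd (pvSeqUpd sp "a" (pr.2.1, cu.2.1)) "b" (pr.2.2.1, cu.2.2.1)) "c" (pr.2.2.2, cu.2.2.2)

def analyze_instruction_fields_alt (data : List Int) (block_size : Int) : (List (Int × List (String × List (Int × Int)))) × (List (String × List (Int × Int × Int))) :=
  let parsed := (PySem.List.pyRange 12 ((data.length : Int) - block_size) block_size).map
      (fun i => pvFields (PySem.List.slice data (some i) (some (i + block_size))))
  let fp := parsed.foldl pvRecord PySem.Dict.empty
  let sp := (parsed.zip (PySem.List.slice parsed (some 1) none)).foldl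
      (fun sp pc => pvTrans sp pc.1 pc.2) PySem.Dict.empty
  (pvRenderFP fp, pvRenderSP sp)

-- ===== PRECONDITION & SPEC =====
-- Pre_ excludes exactly the inputs where Python A raises: block_size = 0 (ValueError from range) and
-- any block_size that makes the loop run with blocks shorter than 4 (IndexError on block[1]/block[2]/block[3]).
def Pre_analyze_instruction_fields (data : List Int) (block_size : Int) : Prop :=
  (4 ≤ block_size) ∨
  (1 ≤ block_size ∧ (data.length : Int) ≤ 12 + block_size) ∨
  (block_size ≤ -1 ∧ 12 + block_size ≤ (data.length : Int))
instance (data : List Int) (block_size : Int) : Decidable (Pre_analyze_instruction_fields data block_size) := by unfold Pre_analyze_instruction_fields; infer_instance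

def pvWitness_analyze_instruction_fields : List Int × Int :=
  ([0,0,0,0,0,0,0,0,0,0,0,0, 1,2,3,4, 200,6,7,8, 9], 4)

def Spec_analyze_instruction_fields (data : List Int) (block_size : Int) (out : (List (Int × List (String × List (Int × Int)))) × (List (String × List (Int × Int × Int)))) : Prop := out = analyze_instruction_fields_alt data block_size
instance (data : List Int) (block_size : Int) (out : (List (Int × List (String × List (Int × Int)))) × (List (String × List (Int × Int × Int)))) : Decidable (Spec_analyze_instruction_fields data block_size out) := by
  unfold Spec_analyze_instruction_fields
  haveI h1 : DecidableEq (String × List (Int × Int)) := inferInstance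
  haveI h2 : DecidableEq (Int × List (String × List (Int × Int))) := inferInstance
  haveI h3 : DecidableEq (List (Int × List (String × List (Int × Int)))) := inferInstance
  haveI h4 : DecidableEq (String × List (Int × Int × Int)) := inferInstance
  haveI h5 : DecidableEq (List (String × List (Int × Int × Int))) := inferInstance
  infer_instance

-- ===== CLAIM (what is proved, stated in full; the proofs are below) =====
def Claim_equal_analyze_instruction_fields : Prop := ∀ (data : List Int) (block_size : Int), Dom_analyze_instruction_fields data block_size → Pre_analyze_instruction_fields data block_size → Spec_analyze_instruction_fields data block_size (analyze_instruction_fields data block_size)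

-- ===== LEMMAS AND PROOFS =====

-- two updates through the same key collapse to one (the Lean image of Python's in-place mutation)
theorem pvModify_modify {κ ν : Type} [BEq κ] [LawfulBEq κ] (d : PySem.Dict κ ν) (k : κ) (d0 : ν) (f g : ν → ν) :
    PySem.Dict.modify (PySem.Dict.modify d k d0 f) k d0 g = PySem.Dict.modify d k d0 (fun v => g (f v)) := by
  simp [PySem.Dict.modify, PySem.Dict.insert_insert_self]

-- A's three per-field statements equal B's single grouped update
theorem pvRecord_eq (fp : pvFP) (t : Int × Int × Int × Int) :
    pvFieldUpd (pvFieldUpd (pvFieldUpd fp t.1 "a" t.2.1) t.1 "b" t.2.2.1) t.1 "c" t.2.2.2 = pvRecord fp t := by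
  simp [pvFieldUpd, pvRecord, pvModify_modify]

theorem pvZip_tail_snoc {α : Type} (L : List α) (x : α) (h : L ≠ []) :
    (L ++ [x]).zip ((L ++ [x]).tail) = L.zip L.tail ++ [(L.getLast h, x)] := by
  induction L with
  | nil => exact absurd rfl h
  | cons a L ih =>
      cases L with
      | nil => simp
      | cons b L' => simpa using ih (by simp)

-- the heart: A's interleaved fold over the index grid equals B's parse-then-tabulate passes
theorem pvLoop (data : List Int) (bs : Int) (hbs : 0 < bs)
    (t : Nat → Int × Int × Int × Int)
    (ht : ∀ k : Nat, t k = pvFields (PySem.List.slice data (some (12 + bs * k)) (some (12 + bs * k + bs)))) :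
    ∀ n : Nat,
      (List.range n).foldl (fun (st : pvFP × pvSP) (k : Nat) => pvStepA data bs st (12 + bs * (k : Int))) (PySem.Dict.empty, PySem.Dict.empty)
      = ((List.range n).foldl (fun fp k => pvRecord fp (t k)) PySem.Dict.empty,
         (((List.range n).map t).zip (((List.range n).map t).tail)).foldl
           (fun (sp : pvSP) pc => pvTrans sp pc.1 pc.2) PySem.Dict.empty) := by
  intro n
  induction n with
  | zero => simp
  | succ n ih =>
      rw [List.range_succ]
      simp only [List.foldl_append, List.map_append, List.map_cons, List.map_nil, List.foldl_cons, List.foldl_nil, ih]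
      have hblock : pvFields (PySem.List.slice data (some (12 + bs * (n : Int))) (some (12 + bs * (n : Int) + bs))) = t n := (ht n).symm
      cases n with
      | zero =>
          simp only [List.range_zero, List.foldl_nil, List.map_nil, List.nil_append]
          show pvStepA data bs _ (12 + bs * 0) = _
          simp only [pvStepA, mul_zero, add_zero]
          rw [show ¬ (12 : Int) < 12 by omega |> if_neg]
          simp only [Nat.cast_zero, mul_zero, add_zero] at hblock
          rw [hblock, pvRecord_eq]
          simp [List.zip]
      | succ m =>
          show pvStepA data bs _ (12 + bs * (↑(m + 1) : Int)) = _
          have hL : ((List.range (m + 1)).map t) ≠ [] := by simp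
          rw [pvZip_tail_snoc _ (t (m + 1)) hL, List.foldl_append, List.foldl_cons, List.foldl_nil]
          have hlast : ((List.range (m + 1)).map t).getLast hL = t m := by
            rw [List.getLast_eq_getElem]
            simp
          rw [hlast]
          simp only [pvStepA]
          have hcond : (12 : Int) < 12 + bs * (↑(m + 1) : Int) := by
            have : (0 : Int) < bs * (↑(m + 1) : Int) := by positivity
            omega
          rw [if_pos hcond, hblock, pvRecord_eq]
          have hprev : PySem.List.slice data (some (12 + bs * (↑(m + 1) : Int) - bs)) (some (12 + bs * (↑(m + 1) : Int)))
              = PySem.List.slice data (some (12 + bs * (m : Int))) (some (12 + bs * (m : Int) + bs)) := by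
            push_cast
            ring_nf
          rw [hprev, ← ht m]
          rfl

-- the loop index list is empty on every Pre_ input with block_size < 4
theorem pvRange_nil (data : List Int) (bs : Int)
    (h : (1 ≤ bs ∧ (data.length : Int) ≤ 12 + bs) ∨ (bs ≤ -1 ∧ 12 + bs ≤ (data.length : Int))) :
    PySem.List.pyRange 12 ((data.length : Int) - bs) bs = [] := by
  rcases h with ⟨h1, h2⟩ | ⟨h1, h2⟩
  · rw [PySem.List.pyRange_of_pos _ _ (by omega)]
    rw [if_neg (by omega)]
    simp
  · simp only [PySem.List.pyRange]
    rw [if_neg (by omega), if_neg (by omega), if_neg (by omega)]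
    simp

theorem pvMain_pos (data : List Int) (bs : Int) (hbs : 0 < bs) :
    analyze_instruction_fields data bs = analyze_instruction_fields_alt data bs := by
  simp only [analyze_instruction_fields, analyze_instruction_fields_alt, PySem.List.slice_from_one,
    PySem.List.pyRange_of_pos _ _ hbs, List.foldl_map, List.map_map, Function.comp_def]
  rw [pvLoop data bs hbs (fun k => pvFields (PySem.List.slice data (some (12 + bs * (k : Int))) (some (12 + bs * (k : Int) + bs)))) (fun _ => rfl)]


-- ===== VERDICT (by name: the statement is the Claim_ definition above) =====
theorem analyze_instruction_fields_spec : Claim_equal_analyze_instruction_fields := by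
  intro data bs _hdom hpre
  unfold Spec_analyze_instruction_fields
  rcases hpre with h4 | hrest
  · exact pvMain_pos data bs (by omega)
  · rcases hrest with ⟨h1, _⟩ | _
    · exact pvMain_pos data bs (by omega)
    · have hnil := pvRange_nil data bs (Or.inr (by assumption))
      simp [analyze_instruction_fields, analyze_instruction_fields_alt, hnil]
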